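-- pv_equiv track=rewrite | github.com/shamikkarkhanis/AV-SSL-Optimization-JEPA | src/jepa/experiments/design.py | _factor_product
-- ===== SOURCE A (Python) =====
-- from itertools import product
-- from typing import Any, Dict, Iterable, List
--
-- def _factor_product(factors: Dict[str, Iterable[Any]]) -> List[Dict[str, Any]]:
--     if not factors:
--         return [{}]
--     keys = list(factors.keys())
--     values_list = [list(factors[key]) for key in keys]
--     combos = []
--     for values in product(*values_list):
--         combos.append({k: v for k, v in zip(keys, values)})
--     return combos
-- ===== SOURCE B (Python) =====
-- def _factor_product(factors):
--     result = [{}]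
--     for key, vals in factors.items():
--         vals = list(vals)
--         result = [{**r, key: v} for r in result for v in vals]
--     return result
-- ===== Notes on version B (the rewrite author's own statement) =====
-- stated objective: simpler
-- what changed: Replaces itertools.product over pre-materialised value lists plus a per-tuple zip/dict-comprehension rebuild with a single fold that extends partial result dicts one factor at a time, needing no special case for empty input.
import Mathlib
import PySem

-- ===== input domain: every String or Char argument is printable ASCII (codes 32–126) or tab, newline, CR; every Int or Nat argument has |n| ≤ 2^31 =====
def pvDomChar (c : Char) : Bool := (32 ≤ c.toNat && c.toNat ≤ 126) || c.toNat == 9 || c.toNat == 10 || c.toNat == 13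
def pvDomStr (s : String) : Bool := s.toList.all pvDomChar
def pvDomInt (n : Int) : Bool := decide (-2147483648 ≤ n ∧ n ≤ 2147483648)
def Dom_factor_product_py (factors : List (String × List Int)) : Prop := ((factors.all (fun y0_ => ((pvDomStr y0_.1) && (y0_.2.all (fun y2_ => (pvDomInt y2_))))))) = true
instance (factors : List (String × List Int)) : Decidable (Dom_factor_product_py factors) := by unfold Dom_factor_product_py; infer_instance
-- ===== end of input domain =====

-- B replaces itertools.product + per-tuple zip/dict rebuild by a fold extending partial
-- dicts one factor at a time (simpler; same cost).

-- ===== PORT A =====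
-- itertools.product(*values_list): leftmost iterable varies slowest
def pyProdA : List (List Int) → List (List Int)
  | [] => [[]]
  | vs :: rest => vs.flatMap (fun v => (pyProdA rest).map (fun t => v :: t))

def factor_product_py (factors : List (String × List Int)) : List (List (String × Int)) :=
  if factors = [] then [[]]
  else
    let keys := factors.map Prod.fst
    -- factors[key]: every key is present, so getD's default is never used
    let values_list := keys.map (fun k => (PySem.Dict.mk factors).getD k [])
    (pyProdA values_list).map (fun values => (PySem.Dict.ofList (keys.zip values)).items)

-- ===== PORT B =====
def factor_product_py_alt (factors : List (String × List Int)) : List (List (String × Int)) :=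
  (factors.foldl
    (fun result kv => result.flatMap (fun r => kv.2.map (fun v => r.insert kv.1 v)))
    [(PySem.Dict.empty : PySem.Dict String Int)]).map PySem.Dict.items

-- ===== PRECONDITION & SPEC =====
-- Pre_ excludes association lists with duplicate keys: such a list does not represent any
-- Python dict (a dict's keys are unique), so no dict input ever decodes to one.
def Pre_factor_product_py (factors : List (String × List Int)) : Prop :=
  (factors.map Prod.fst).Nodup
instance (factors : List (String × List Int)) : Decidable (Pre_factor_product_py factors) := by
  unfold Pre_factor_product_py; infer_instance

def pvWitness_factor_product_py : (List (String × List Int)) := [("a", [1, 2]), ("b", [3])]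

def Spec_factor_product_py (factors : List (String × List Int)) (out : List (List (String × Int))) : Prop := out = factor_product_py_alt factors
instance (factors : List (String × List Int)) (out : List (List (String × Int))) : Decidable (Spec_factor_product_py factors out) := by unfold Spec_factor_product_py; infer_instance

-- ===== CLAIM (what is proved, stated in full; the proofs are below) =====
def Claim_equal_factor_product_py : Prop := ∀ (factors : List (String × List Int)), Dom_factor_product_py factors → Pre_factor_product_py factors → Spec_factor_product_py factors (factor_product_py factors)

-- ===== LEMMAS AND PROOFS =====

-- the common reference value: all key/value combinations, head factor varying slowest
def pvCombos : List (String × List Int) → List (List (String × Int))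
  | [] => [[]]
  | (k, vs) :: rest => vs.flatMap (fun v => (pvCombos rest).map (fun c => (k, v) :: c))

theorem pvCombos_keys (pairs : List (String × List Int)) :
    ∀ c ∈ pvCombos pairs, c.map Prod.fst = pairs.map Prod.fst := by
  induction pairs with
  | nil => intro c hc; simp [pvCombos] at hc; simp [hc]
  | cons p rest ih =>
    obtain ⟨k, vs⟩ := p
    intro c hc
    simp [pvCombos] at hc
    obtain ⟨v, _, c', hc', rfl⟩ := hc
    simp [ih c' hc']

theorem pyProdA_zip (pairs : List (String × List Int)) :
    (pyProdA (pairs.map Prod.snd)).map (fun t => (pairs.map Prod.fst).zip t) = pvCombos pairs := by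
  induction pairs with
  | nil => simp [pyProdA, pvCombos]
  | cons p rest ih =>
    obtain ⟨k, vs⟩ := p
    simp only [List.map_cons, pyProdA, pvCombos, List.map_flatMap, List.map_map]
    refine List.flatMap_congr (fun v _ => ?_)
    rw [← ih, List.map_map]
    rfl

theorem values_list_eq (pairs : List (String × List Int))
    (h : (pairs.map Prod.fst).Nodup) :
    (pairs.map Prod.fst).map (fun k => (PySem.Dict.mk pairs).getD k []) = pairs.map Prod.snd := by
  induction pairs with
  | nil => simp
  | cons p rest ih =>
    obtain ⟨k, vs⟩ := p
    simp only [List.map_cons, List.nodup_cons] at h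
    simp only [List.map_cons, List.cons.injEq]
    refine ⟨?_, ?_⟩
    · simp [PySem.Dict.getD, PySem.Dict.get?_mk_cons]
    · rw [← ih h.2]
      refine List.map_congr_left (fun k' hk' => ?_)
      have hne : k ≠ k' := fun he => h.1 (he ▸ hk')
      simp [PySem.Dict.getD, PySem.Dict.get?_mk_cons, hne]

theorem ofList_items_of_nodup {l : List (String × Int)} (h : (l.map Prod.fst).Nodup) :
    (PySem.Dict.ofList l).items = l := by
  have := PySem.Dict.items_foldl_insert_fresh l Prod.fst Prod.snd (PySem.Dict.empty)
    (fun a _ => by simp) h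
  simpa [PySem.Dict.ofList, PySem.Dict.update] using this

theorem A_eq_combos (pairs : List (String × List Int))
    (h : (pairs.map Prod.fst).Nodup) :
    factor_product_py pairs = pvCombos pairs := by
  by_cases hp : pairs = []
  · subst hp; simp [factor_product_py, pvCombos]
  · unfold factor_product_py
    simp only [hp]
    rw [values_list_eq pairs h]
    have : (pyProdA (pairs.map Prod.snd)).map
        (fun values => (PySem.Dict.ofList ((pairs.map Prod.fst).zip values)).items)
        = ((pyProdA (pairs.map Prod.snd)).map (fun t => (pairs.map Prod.fst).zip t)).map
            (fun l => (PySem.Dict.ofList l).items) := by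
      rw [List.map_map]; rfl
    rw [this, pyProdA_zip]
    refine (List.map_congr_left (fun c hc => ?_)).trans (List.map_id _)
    exact ofList_items_of_nodup ((pvCombos_keys pairs c hc) ▸ h)

theorem flatMap_one {α β : Type} (res : List α) (f : α → β) :
    List.flatMap (fun r => [f r]) res = List.map f res := by
  induction res with
  | nil => simp
  | cons a t ih => simp [List.flatMap_cons, ih]

theorem B_fold (pairs : List (String × List Int)) (res : List (PySem.Dict String Int))
    (h : (pairs.map Prod.fst).Nodup)
    (hres : ∀ r ∈ res, ∀ k ∈ pairs.map Prod.fst, r.contains k = false) :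
    (pairs.foldl
        (fun result kv => result.flatMap (fun r => kv.2.map (fun v => r.insert kv.1 v)))
        res).map PySem.Dict.items
      = res.flatMap (fun r => (pvCombos pairs).map (fun c => r.items ++ c)) := by
  induction pairs generalizing res with
  | nil =>
    simp only [List.foldl_nil, pvCombos, List.map_cons, List.map_nil, List.append_nil]
    exact (flatMap_one res PySem.Dict.items).symm
  | cons p rest ih =>
    obtain ⟨k, vs⟩ := p
    simp only [List.map_cons, List.nodup_cons] at h
    simp only [List.foldl_cons]
    have hfresh : ∀ r' ∈ res.flatMap (fun r => vs.map (fun v => r.insert k v)),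
        ∀ k' ∈ rest.map Prod.fst, r'.contains k' = false := by
      intro r' hr' k' hk'
      simp only [List.mem_flatMap, List.mem_map] at hr'
      obtain ⟨r, hr, v, _, rfl⟩ := hr'
      have hne : k' ≠ k := fun he => h.1 (he ▸ hk')
      rw [PySem.Dict.contains_insert]
      simp only [beq_eq_false_iff_ne, ne_eq, Bool.or_eq_false_iff]
      exact ⟨by simpa using hne, hres r hr k' (by simp [hk'])⟩
    rw [ih _ h.2 hfresh]
    rw [List.flatMap_assoc]
    refine List.flatMap_congr (fun r hr => ?_)
    have hk : r.contains k = false := hres r hr k (by simp)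
    simp only [pvCombos, List.map_flatMap, List.flatMap_map]
    refine List.flatMap_congr (fun v _ => ?_)
    simp [PySem.Dict.items_insert_of_not_contains r v hk, List.map_map,
      List.append_assoc, Function.comp]

theorem B_eq_combos (pairs : List (String × List Int))
    (h : (pairs.map Prod.fst).Nodup) :
    factor_product_py_alt pairs = pvCombos pairs := by
  unfold factor_product_py_alt
  rw [B_fold pairs [PySem.Dict.empty] h (by intro r hr; simp at hr; simp [hr])]
  simp only [List.flatMap_cons, List.flatMap_nil, List.append_nil]
  refine (List.map_congr_left (fun c _ => ?_)).trans (List.map_id _)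
  rfl

-- ===== VERDICT (by name: the statement is the Claim_ definition above) =====
theorem factor_product_py_spec : Claim_equal_factor_product_py := by
  intro factors _hd hpre
  unfold Spec_factor_product_py
  rw [A_eq_combos factors hpre, B_eq_combos factors hpre]
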